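-- pv_equiv track=rewrite | github.com/mattdinhnguyen/CtCI-6th-Edition-Python | chapter_10/p02_group_anagrams.py | groupAnagramIndices
-- ===== SOURCE A (Python) =====
-- from typing import List
-- from collections import Counter
--
-- def groupAnagramIndices(strs: List[str]) -> List[List[str]]:
--     groups = []; a2i = dict()
--     i = 0
--     for j,s in enumerate(strs,1):
--         key = frozenset(Counter(s).items())
--         if key in a2i:
--             groups[a2i[key]].append(j)
--         else:
--             a2i[key] = i; i += 1; groups.append([j])
--     return groups
-- ===== SOURCE B (Python) =====
-- from typing import List
--
-- def groupAnagramIndices(strs: List[str]) -> List[List[str]]: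
--     sigs = [''.join(sorted(s)) for s in strs]
--     return [[j + 1 for j in range(i, len(strs)) if sigs[j] == sigs[i]]
--             for i in range(len(strs)) if sigs[i] not in sigs[:i]]
-- ===== Notes on version B (the rewrite author's own statement) =====
-- stated objective: alternative
-- what changed: Replaces the hash-keyed single-pass grouping (groups list + key-to-index dict + running counter) by a dict-free two-stage quadratic scan: compute the sorted-string signature of every string once, then for each first-occurrence position collect by direct comparison the 1-based indices of all later positions with an equal signature.
import Mathlib
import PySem

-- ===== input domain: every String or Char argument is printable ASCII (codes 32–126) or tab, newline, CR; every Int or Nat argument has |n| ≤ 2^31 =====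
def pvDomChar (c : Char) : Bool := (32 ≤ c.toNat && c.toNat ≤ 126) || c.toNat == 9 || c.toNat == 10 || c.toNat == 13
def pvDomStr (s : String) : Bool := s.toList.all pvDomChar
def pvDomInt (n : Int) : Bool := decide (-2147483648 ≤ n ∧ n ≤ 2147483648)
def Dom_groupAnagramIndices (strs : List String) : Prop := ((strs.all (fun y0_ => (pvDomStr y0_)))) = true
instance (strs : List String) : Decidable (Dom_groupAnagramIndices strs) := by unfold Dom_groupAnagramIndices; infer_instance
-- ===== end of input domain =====

-- B drops A's hash-keyed single pass (groups list + key-to-index dict + counter) for a dict-free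
-- two-stage quadratic scan over precomputed sorted-string signatures (alternative, not faster).

-- ===== PORT A =====
-- A's key frozenset(Counter(s).items()): the item list of the counter (duplicate-free by construction).
def pvCounterItems (s : String) : List (Char × Int) := (PySem.Dict.counter s.toList).items

-- Python frozenset equality on the duplicate-free item lists: mutual membership (hand port, exact there).
def pvFsEq (a b : List (Char × Int)) : Bool :=
  (a.all (fun x => b.contains x)) && (b.all (fun x => a.contains x))

-- a2i is a Python dict keyed by frozensets: first-match lookup under frozenset equality (hand port, exact:
-- the keys stored in a2i are pairwise non-equal under pvFsEq, so the first match is the only match).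
def pvA2iGet? (a2i : List (List (Char × Int) × Int)) (k : List (Char × Int)) : Option Int :=
  (a2i.find? (fun p => pvFsEq p.1 k)).map (fun p => p.2)

-- the body of A's for-loop; state = (groups, a2i, i).  groups[a2i[key]] indexes with the stored i,
-- which is always a nonnegative in-range position, so .toNat is exact here.
def pvStepA (st : List (List Int) × List (List (Char × Int) × Int) × Int) (p : Int × String) :
    List (List Int) × List (List (Char × Int) × Int) × Int :=
  match pvA2iGet? st.2.1 (pvCounterItems p.2) with
  | some n => (st.1.modify n.toNat (fun g => g ++ [p.1]), st.2.1, st.2.2)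
  | none => (st.1 ++ [[p.1]], st.2.1 ++ [(pvCounterItems p.2, st.2.2)], st.2.2 + 1)

def groupAnagramIndices (strs : List String) : List (List Int) :=
  ((PySem.List.enumerate strs 1).foldl pvStepA ([], [], 0)).1

-- ===== PORT B =====
-- ''.join(sorted(s)): the string of s's characters in sorted order (join of 1-char strings = their concatenation).
def pvSig (s : String) : String := String.ofList (PySem.List.sorted s.toList (fun c => c))

def groupAnagramIndices_alt (strs : List String) : List (List Int) :=
  let sigs := strs.map pvSig
  ((PySem.List.pyRange 0 (strs.length : Int) 1).filter
      (fun i => ! (PySem.List.slice sigs none (some i)).contains (PySem.List.pyGetD sigs i ""))).map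
    (fun i => ((PySem.List.pyRange i (strs.length : Int) 1).filter
        (fun j => PySem.List.pyGetD sigs j "" == PySem.List.pyGetD sigs i "")).map (fun j => j + 1))

-- ===== PRECONDITION & SPEC =====
def Spec_groupAnagramIndices (strs : List String) (out : List (List Int)) : Prop := out = groupAnagramIndices_alt strs
instance (strs : List String) (out : List (List Int)) : Decidable (Spec_groupAnagramIndices strs out) := by unfold Spec_groupAnagramIndices; infer_instance

-- ===== CLAIM (what is proved, stated in full; the proofs are below) =====
def Claim_equal_groupAnagramIndices : Prop := ∀ (strs : List String), Dom_groupAnagramIndices strs → Spec_groupAnagramIndices strs (groupAnagramIndices strs)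

-- ===== LEMMAS AND PROOFS =====

-- membership in A's key: (c, n) ∈ Counter(s).items() iff c occurs in s and n is its count
lemma pv_mem_counterItems (s : String) (x : Char × Int) :
    x ∈ pvCounterItems s ↔ x.1 ∈ s.toList ∧ x.2 = (s.toList.count x.1 : Int) := by
  simp only [pvCounterItems, PySem.Dict.items_counter, List.mem_map]
  constructor
  · rintro ⟨k, hk, rfl⟩
    exact ⟨(PySem.Set.mem_ofList _ _).1 hk, rfl⟩
  · rintro ⟨h1, h2⟩
    exact ⟨x.1, (PySem.Set.mem_ofList _ _).2 h1, by cases x; simp_all⟩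

-- two strings have the same sorted-string signature iff their character lists are permutations
lemma pv_sig_eq_iff (t s : String) : pvSig t = pvSig s ↔ t.toList.Perm s.toList := by
  unfold pvSig
  constructor
  · intro h
    have h' : PySem.List.sorted t.toList (fun c => c) = PySem.List.sorted s.toList (fun c => c) := by
      have := congrArg String.toList h; simpa using this
    exact (PySem.List.sorted_perm t.toList (fun c => c) false).symm.trans
      (h' ▸ PySem.List.sorted_perm s.toList (fun c => c) false)
  · intro h
    congr 1
    apply List.Perm.eq_of_pairwise (fun a b _ _ h1 h2 => le_antisymm h1 h2)
    · exact PySem.List.sorted_pairwise _ _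
    · exact PySem.List.sorted_pairwise _ _
    · exact ((PySem.List.sorted_perm t.toList (fun c => c) false).trans h).trans
        (PySem.List.sorted_perm s.toList (fun c => c) false).symm

-- the key bridge: frozenset equality of the two counters = equality of the sorted-string signatures
lemma pv_fsEq_eq (t s : String) : pvFsEq (pvCounterItems t) (pvCounterItems s) = (pvSig t == pvSig s) := by
  rw [Bool.eq_iff_iff]
  simp only [pvFsEq, Bool.and_eq_true, List.all_eq_true, beq_iff_eq, List.contains_eq_mem,
    decide_eq_true_eq]
  rw [pv_sig_eq_iff, List.perm_iff_count]
  constructor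
  · rintro ⟨h1, h2⟩ c
    by_cases hc : c ∈ t.toList
    · have := h1 (c, (t.toList.count c : Int)) ((pv_mem_counterItems t _).2 ⟨hc, rfl⟩)
      have h2 := ((pv_mem_counterItems s _).1 this).2
      simp only [] at h2
      exact_mod_cast h2
    · by_cases hcs : c ∈ s.toList
      · have := h2 (c, (s.toList.count c : Int)) ((pv_mem_counterItems s _).2 ⟨hcs, rfl⟩)
        have := (pv_mem_counterItems t _).1 this
        exact absurd this.1 hc
      · simp [List.count_eq_zero_of_not_mem, hc, hcs]
  · intro h
    constructor
    · intro x hx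
      obtain ⟨h1, h2⟩ := (pv_mem_counterItems t _).1 hx
      refine (pv_mem_counterItems s _).2 ⟨?_, by rw [h2, h x.1]⟩
      have := h x.1
      have : 0 < s.toList.count x.1 := by
        have := List.count_pos_iff.2 h1; omega
      exact List.count_pos_iff.1 this
    · intro x hx
      obtain ⟨h1, h2⟩ := (pv_mem_counterItems s _).1 hx
      refine (pv_mem_counterItems t _).2 ⟨?_, by rw [h2, h x.1]⟩
      have := h x.1
      have : 0 < t.toList.count x.1 := by
        have := List.count_pos_iff.2 h1; omega
      exact List.count_pos_iff.1 this

-- lookup in A's a2i (built from one representative string per group): position of the signature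
lemma pv_a2iGet (reps : List String) (n0 : Nat) (s : String) :
    pvA2iGet? ((reps.zipIdx n0).map (fun q => (pvCounterItems q.1, (q.2 : Int)))) (pvCounterItems s)
      = if pvSig s ∈ reps.map pvSig
        then some ((n0 + (reps.map pvSig).idxOf (pvSig s) : Nat) : Int)
        else none := by
  induction reps generalizing n0 with
  | nil => simp [pvA2iGet?]
  | cons t rest ih =>
    by_cases h : pvSig t = pvSig s
    · simp [pvA2iGet?, List.zipIdx_cons, pv_fsEq_eq, h]
    · have hb : (pvSig t == pvSig s) = false := by simp [h]
      simp only [pvA2iGet?, List.zipIdx_cons, List.map_cons, List.find?_cons, pv_fsEq_eq, hb]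
      have := ih (n0 + 1)
      simp only [pvA2iGet?] at this
      rw [this]
      by_cases hmem : pvSig s ∈ rest.map pvSig
      · simp [hmem, h, Ne.symm h]
        omega
      · simp [hmem, Ne.symm h]

-- canonical description of the grouping: distinct signatures in first-appearance order, each with its indices
def pvCanon (l : List (Int × String)) : List (List Int) :=
  (PySem.Set.ofList (l.map (fun p => pvSig p.2))).map
    (fun c => (l.filter (fun p => pvSig p.2 == c)).map (fun p => p.1))

-- modifying at the (unique) position of a key in a duplicate-free key list = a pointwise conditional append
lemma pv_modify_map (ks : List String) (F : String → List Int) (c : String) (j : Int)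
    (hnd : ks.Nodup) (hc : c ∈ ks) :
    (ks.map F).modify (ks.idxOf c) (fun g => g ++ [j])
      = ks.map (fun k => F k ++ if c == k then [j] else []) := by
  induction ks with
  | nil => simp at hc
  | cons k rest ih =>
    rcases List.nodup_cons.1 hnd with ⟨hkr, hndr⟩
    by_cases hk : c = k
    · subst hk
      simp only [List.idxOf_cons_self, List.map_cons, List.modify_zero_cons,
        BEq.rfl, if_true]
      congr 1
      refine (List.map_congr_left ?_).symm
      intro x hx
      have : ¬ c = x := fun h => hkr (h ▸ hx)
      simp [beq_eq_false_iff_ne.2 this]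
    · have hcr : c ∈ rest := by
        rcases List.mem_cons.1 hc with h | h
        · exact absurd h hk
        · exact h
      rw [List.idxOf_cons_ne _ (by simpa using fun h => hk h.symm)]
      simp only [List.map_cons, List.modify_succ_cons, ih hndr hcr]
      have : (c == k) = false := beq_eq_false_iff_ne.2 hk
      simp [this]

-- A's fold reaches exactly the canonical grouping (with a matching a2i over representative strings)
lemma pv_A_char (l : List (Int × String)) :
    ∃ reps : List String,
      reps.map pvSig = PySem.Set.ofList (l.map (fun p => pvSig p.2)) ∧
      l.foldl pvStepA ([], [], 0) =
        (pvCanon l,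
         (reps.zipIdx 0).map (fun q => (pvCounterItems q.1, (q.2 : Int))),
         (reps.length : Int)) := by
  induction l using List.reverseRecOn with
  | nil => exact ⟨[], by simp [PySem.Set.ofList], by simp [pvCanon, PySem.Set.ofList]⟩
  | append_singleton l p ih =>
    obtain ⟨reps, hkeys, hfold⟩ := ih
    rw [List.foldl_append, hfold]
    have hofl : PySem.Set.ofList ((l ++ [p]).map (fun q => pvSig q.2))
        = PySem.Set.add (PySem.Set.ofList (l.map (fun q => pvSig q.2))) (pvSig p.2) := by
      simp [PySem.Set.ofList]
    by_cases hmem : pvSig p.2 ∈ reps.map pvSig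
    · -- the signature already has a group: A appends to it in place
      refine ⟨reps, ?_, ?_⟩
      · rw [hofl, ← hkeys]
        have : PySem.Set.add (reps.map pvSig) (pvSig p.2) = reps.map pvSig := by
          simp [PySem.Set.add, List.contains_eq_mem, hmem]
        rw [this]
      · simp only [List.foldl_cons, List.foldl_nil, pvStepA, pv_a2iGet, hmem, if_true]
        have hndk : (reps.map pvSig).Nodup := hkeys ▸ PySem.Set.nodup_ofList _
        have hkeq : PySem.Set.ofList ((l ++ [p]).map (fun q => pvSig q.2)) = reps.map pvSig := by
          rw [hofl, ← hkeys]
          simp [PySem.Set.add, List.contains_eq_mem, hmem]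
        refine Prod.ext ?_ rfl
        simp only [Nat.zero_add, Int.toNat_natCast]
        unfold pvCanon
        rw [hkeq, ← hkeys, pv_modify_map _ _ _ _ hndk hmem]
        refine List.map_congr_left ?_
        intro c hc
        simp only [List.filter_append, List.map_append]
        congr 1
        by_cases h : pvSig p.2 = c <;> simp [h]
    · -- a new signature: A opens a new group at the end
      refine ⟨reps ++ [p.2], ?_, ?_⟩
      · rw [hofl, ← hkeys]
        simp [PySem.Set.add, List.contains_eq_mem, hmem]
      · simp only [List.foldl_cons, List.foldl_nil, pvStepA, pv_a2iGet, hmem, if_false]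
        simp only [Prod.mk.injEq]
        refine ⟨?_, ?_, ?_⟩
        · unfold pvCanon
          rw [hofl, ← hkeys]
          have hadd : PySem.Set.add (reps.map pvSig) (pvSig p.2) = reps.map pvSig ++ [pvSig p.2] := by
            simp [PySem.Set.add, List.contains_eq_mem, hmem]
          rw [hadd, List.map_append]
          congr 1
          · refine List.map_congr_left ?_
            intro c hc
            have hne : (pvSig p.2 == c) = false := beq_eq_false_iff_ne.2 (fun h => hmem (h ▸ hc))
            simp [List.filter_append, hne]
          · have hnil : l.filter (fun q => pvSig q.2 == pvSig p.2) = [] := by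
              rw [List.filter_eq_nil_iff]
              intro q hq hq2
              apply hmem
              rw [hkeys]
              exact (PySem.Set.mem_ofList _ _).2 (List.mem_map.2 ⟨q, hq, by simpa using hq2⟩)
            simp [List.filter_append, hnil]
        · simp [List.zipIdx_append, List.zipIdx_cons]
        · simp only [List.length_append, List.length_cons, List.length_nil]
          push_cast
          ring

-- B-side proof helpers: the first-occurrence positions of a list of signatures
def pvFirsts (xs : List String) : List Nat :=
  (List.range xs.length).filter (fun k => ! (xs.take k).contains (xs.getD k ""))

-- mapping each first-occurrence position to its signature yields the distinct signatures in order
lemma pv_firsts_map (xs : List String) :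
    (pvFirsts xs).map (fun k => xs.getD k "") = PySem.Set.ofList xs := by
  induction xs using List.reverseRecOn with
  | nil => simp [pvFirsts, PySem.Set.ofList]
  | append_singleton xs a ih =>
    have hsplit : pvFirsts (xs ++ [a])
        = (List.range xs.length).filter (fun k => ! (xs.take k).contains (xs.getD k ""))
          ++ (if a ∈ xs then [] else [xs.length]) := by
      unfold pvFirsts
      rw [show (xs ++ [a]).length = xs.length + 1 by simp, List.range_succ, List.filter_append]
      congr 1
      · apply List.filter_congr
        intro k hk
        have hk' : k < xs.length := List.mem_range.1 hk
        rw [List.take_append_of_le_length (le_of_lt hk'), List.getD_append _ _ _ _ hk']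
      · have ht : (xs ++ [a]).take xs.length = xs := by
          rw [List.take_append_of_le_length (le_refl _), List.take_length]
        have hg : (xs ++ [a]).getD xs.length "" = a := by
          rw [List.getD_eq_getElem _ _ (by simp)]
          simp
        simp only [List.filter_cons, List.filter_nil, ht, hg, List.contains_eq_mem]
        by_cases ha : a ∈ xs <;> simp [ha]
    rw [hsplit, List.map_append]
    have h1 : ((List.range xs.length).filter
          (fun k => ! (xs.take k).contains (xs.getD k ""))).map (fun k => (xs ++ [a]).getD k "")
        = PySem.Set.ofList xs := by
      rw [← ih]
      apply List.map_congr_left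
      intro k hk
      have hk' : k < xs.length := List.mem_range.1 (List.mem_filter.1 hk).1
      rw [List.getD_append _ _ _ _ hk']
    rw [h1]
    have hofl : PySem.Set.ofList (xs ++ [a]) = PySem.Set.add (PySem.Set.ofList xs) a := by
      simp [PySem.Set.ofList]
    rw [hofl]
    have hga : (xs ++ [a]).getD xs.length "" = a := by
      rw [List.getD_eq_getElem _ _ (by simp)]; simp
    by_cases ha : a ∈ xs
    · have hadd : PySem.Set.add (PySem.Set.ofList xs) a = PySem.Set.ofList xs := by
        simp [PySem.Set.add, List.contains_eq_mem, (PySem.Set.mem_ofList _ _).2 ha]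
      rw [if_pos ha, hadd, List.map_nil, List.append_nil]
    · have hmem : a ∉ PySem.Set.ofList xs := fun h => ha ((PySem.Set.mem_ofList _ _).1 h)
      have hadd : PySem.Set.add (PySem.Set.ofList xs) a = PySem.Set.ofList xs ++ [a] := by
        simp [PySem.Set.add, List.contains_eq_mem, hmem]
      rw [if_neg ha, hadd, List.map_cons, List.map_nil, hga]

-- a first occurrence sees no equal signature before it, so its group may start the scan at its own position
lemma pv_firsts_group (xs : List String) (k : Nat) (hk : k ∈ pvFirsts xs) (F : Nat → Int) :
    ((List.range' k (xs.length - k)).filter (fun j => xs.getD j "" == xs.getD k "")).map F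
      = ((List.range xs.length).filter (fun j => xs.getD j "" == xs.getD k "")).map F := by
  have hm := List.mem_filter.1 hk
  have hkn : k < xs.length := List.mem_range.1 hm.1
  have hnc : ¬ xs.getD k "" ∈ xs.take k := by
    have := hm.2; simp only [Bool.not_eq_eq_eq_not, Bool.not_true, List.contains_eq_mem] at this
    simpa using this
  have hrange : List.range xs.length = List.range' 0 k ++ List.range' k (xs.length - k) := by
    rw [List.range_eq_range', show xs.length = k + (xs.length - k) by omega]
    simpa using (List.range'_append_1 (s := 0) (m := k) (n := xs.length - k)).symm
  rw [hrange, List.filter_append]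
  have h0 : (List.range' 0 k).filter (fun j => xs.getD j "" == xs.getD k "") = [] := by
    rw [List.filter_eq_nil_iff]
    intro j hj hbeq
    have hjk : j < k := by have := List.mem_range'_1.1 hj; omega
    apply hnc
    rw [← beq_iff_eq.1 hbeq]
    have hjl : j < xs.length := lt_trans hjk hkn
    rw [List.getD_eq_getElem xs _ hjl]
    exact List.mem_take_iff_getElem.2 ⟨j, by simp; omega, by simp⟩
  rw [h0, List.nil_append]

-- the enumerate-side view of a group: the indices in Int form
lemma pv_enum_group (xs : List String) (s : Int) (c : String) :
    ((PySem.List.enumerate xs s).filter (fun p => pvSig p.2 == c)).map (fun p => p.1)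
      = ((List.range xs.length).filter (fun j => (xs.map pvSig).getD j "" == c)).map
          (fun (j : Nat) => s + (j : Int)) := by
  induction xs generalizing s with
  | nil => simp [PySem.List.enumerate_nil]
  | cons x xs ih =>
    rw [PySem.List.enumerate_cons, List.length_cons, List.range_succ_eq_map, List.filter_cons,
      List.filter_cons, List.filter_map]
    have hfc : (List.range xs.length).filter
          ((fun j => ((x :: xs).map pvSig).getD j "" == c) ∘ Nat.succ)
        = (List.range xs.length).filter (fun j => (xs.map pvSig).getD j "" == c) :=
      List.filter_congr (by intro j _; simp [Function.comp])
    rw [hfc]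
    have htail : ((List.range xs.length).filter
          (fun j => (xs.map pvSig).getD j "" == c)).map ((fun (j : Nat) => s + (j : Int)) ∘ Nat.succ)
        = ((List.range xs.length).filter
          (fun j => (xs.map pvSig).getD j "" == c)).map (fun (j : Nat) => (s + 1) + (j : Int)) := by
      apply List.map_congr_left
      intro j _
      simp only [Function.comp]
      push_cast
      ring
    by_cases h : pvSig x = c
    · rw [if_pos (by simpa using h), if_pos (by simp [h]), List.map_cons, List.map_cons,
        List.map_map, htail, ih (s + 1)]
      simp
    · rw [if_neg (by simpa using h), if_neg (by simp [h]), List.map_map, htail, ih (s + 1)]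

-- B computes the canonical grouping
lemma pv_B_char (strs : List String) :
    groupAnagramIndices_alt strs = pvCanon (PySem.List.enumerate strs 1) := by
  have hlen : (strs.map pvSig).length = strs.length := by simp
  -- the inner comprehension at a first-occurrence position k is the full group of k's signature
  have hinner : ∀ k ∈ pvFirsts (strs.map pvSig),
      ((PySem.List.pyRange (k : Int) (strs.length : Int) 1).filter
          (fun j => PySem.List.pyGetD (strs.map pvSig) j ""
            == PySem.List.pyGetD (strs.map pvSig) (k : Int) "")).map (fun j => j + 1)
        = ((List.range strs.length).filter
            (fun j => (strs.map pvSig).getD j "" == (strs.map pvSig).getD k "")).map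
            (fun (j : Nat) => (j : Int) + 1) := by
    intro k hk
    have hkn : k < strs.length := by
      have := List.mem_range.1 (List.mem_filter.1 hk).1
      omega
    have htn : ((strs.length : Int) - (k : Int)).toNat = strs.length - k := by omega
    rw [PySem.List.pyRange_one, htn, List.filter_map, List.map_map]
    have hr' : List.range' k (strs.length - k) = (List.range (strs.length - k)).map (k + ·) := by
      rw [List.range'_eq_map_range]
    have hstep : ((List.range' k (strs.length - k)).filter
          (fun j => (strs.map pvSig).getD j "" == (strs.map pvSig).getD k "")).map
          (fun (j : Nat) => (j : Int) + 1)
        = ((List.range (strs.length - k)).filter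
            ((fun j => (strs.map pvSig).getD j "" == (strs.map pvSig).getD k "") ∘ (k + ·))).map
            ((fun (j : Nat) => (j : Int) + 1) ∘ (k + ·)) := by
      rw [hr', List.filter_map, List.map_map]
    trans (((List.range (strs.length - k)).filter
        ((fun j => (strs.map pvSig).getD j "" == (strs.map pvSig).getD k "") ∘ (k + ·))).map
        ((fun (j : Nat) => (j : Int) + 1) ∘ (k + ·)))
    · congr 1
      · apply List.filter_congr
        intro t _
        simp only [Function.comp]
        rw [show (k : Int) + (t : Int) = ((k + t : Nat) : Int) by push_cast; ring,
          PySem.List.pyGetD_natCast, PySem.List.pyGetD_natCast]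
    · rw [← hstep]
      have hfg := pv_firsts_group (strs.map pvSig) k hk (fun (j : Nat) => (j : Int) + 1)
      rw [hlen] at hfg
      exact hfg
  -- normalise B's outer comprehension to a map over the first-occurrence positions
  have houter : PySem.List.pyRange 0 (strs.length : Int) 1
      = (List.range strs.length).map (fun (k : Nat) => (k : Int)) := by
    rw [PySem.List.pyRange_one]
    simp
  simp only [groupAnagramIndices_alt]
  rw [houter, List.filter_map, List.map_map]
  have hfilt : (List.range strs.length).filter
        ((fun i => ! (PySem.List.slice (strs.map pvSig) none (some i)).contains
          (PySem.List.pyGetD (strs.map pvSig) i "")) ∘ fun (k : Nat) => (k : Int))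
      = pvFirsts (strs.map pvSig) := by
    unfold pvFirsts
    rw [hlen]
    apply List.filter_congr
    intro k _
    simp only [Function.comp]
    rw [PySem.List.slice_to_natCast, PySem.List.pyGetD_natCast]
  rw [hfilt]
  have hmaps : (pvFirsts (strs.map pvSig)).map
        ((fun i => ((PySem.List.pyRange i (strs.length : Int) 1).filter
            (fun j => PySem.List.pyGetD (strs.map pvSig) j ""
              == PySem.List.pyGetD (strs.map pvSig) i "")).map (fun j => j + 1))
          ∘ fun (k : Nat) => (k : Int))
      = (pvFirsts (strs.map pvSig)).map
          (fun k => ((List.range strs.length).filter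
            (fun j => (strs.map pvSig).getD j "" == (strs.map pvSig).getD k "")).map
            (fun (j : Nat) => (j : Int) + 1)) := by
    apply List.map_congr_left
    intro k hk
    exact hinner k hk
  rw [hmaps]
  -- both sides are a map over the distinct signatures in first-appearance order
  have hcomp : (pvFirsts (strs.map pvSig)).map
        (fun k => ((List.range strs.length).filter
          (fun j => (strs.map pvSig).getD j "" == (strs.map pvSig).getD k "")).map
          (fun (j : Nat) => (j : Int) + 1))
      = ((pvFirsts (strs.map pvSig)).map (fun k => (strs.map pvSig).getD k "")).map
          (fun c => ((List.range strs.length).filter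
            (fun j => (strs.map pvSig).getD j "" == c)).map (fun (j : Nat) => (j : Int) + 1)) := by
    rw [List.map_map]
    rfl
  rw [hcomp, pv_firsts_map]
  unfold pvCanon
  have hsigs : (PySem.List.enumerate strs 1).map (fun p => pvSig p.2) = strs.map pvSig := by
    rw [show (fun p : Int × String => pvSig p.2) = pvSig ∘ (fun p : Int × String => p.2) from rfl,
      ← List.map_map, PySem.List.map_snd_enumerate]
  rw [hsigs]
  apply List.map_congr_left
  intro c _
  rw [pv_enum_group strs 1 c]
  apply List.map_congr_left
  intro j _
  ring

-- ===== VERDICT (by name: the statement is the Claim_ definition above) =====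
theorem groupAnagramIndices_spec : Claim_equal_groupAnagramIndices := by
  intro strs _
  unfold Spec_groupAnagramIndices groupAnagramIndices
  obtain ⟨reps, _, hA⟩ := pv_A_char (PySem.List.enumerate strs 1)
  rw [hA, pv_B_char]
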